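-- pv_equiv track=rewrite | github.com/afmhenry/adventofcode2021 | dec10/main.py | fixIncomplete
-- ===== SOURCE A (Python) =====
-- key_keeper = ["(", "[", "{", "<"]
--
-- lock_keeper = [")", "]", "}", ">"]
--
-- def fixIncomplete(row):
--     active_chunks = []
--     repaired_chunks = []
--     for char in row:
--         if char in key_keeper:
--             active_chunks.append(char)
--         else:
--             active_chunks.pop()
--
--     for char in active_chunks:
--         repaired_chunks.append(lock_keeper[key_keeper.index(char)])
--
--     repaired_chunks.reverse()
--     return repaired_chunks
-- ===== SOURCE B (Python) =====
-- CLOSERS = {"(": ")", "[": "]", "{": "}", "<": ">"}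
--
-- def fixIncomplete(row):
--     # String rewriting: repeatedly delete an adjacent opener/non-opener pair
--     # (the non-opener closes the opener just before it).  The normal form is
--     # exactly the unclosed openers; the line is completed by their closing
--     # brackets, innermost (rightmost) first.
--     chars = row
--     while True:
--         for i in range(len(chars) - 1):
--             if chars[i] in CLOSERS and chars[i + 1] not in CLOSERS:
--                 chars = chars[:i] + chars[i + 2:]
--                 break
--         else:
--             break
--     return [CLOSERS[c] for c in reversed(chars)]
-- ===== Notes on version B (the rewrite author's own statement) =====
-- stated objective: alternative
-- what changed: B replaces A's stack scan plus separate translate-and-reverse passes by a string-rewriting algorithm: it repeatedly deletes an adjacent opener/non-opener pair until a normal form (the unclosed openers) remains, then maps that normal form reversed through an opener-to-closer dict.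
import Mathlib
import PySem

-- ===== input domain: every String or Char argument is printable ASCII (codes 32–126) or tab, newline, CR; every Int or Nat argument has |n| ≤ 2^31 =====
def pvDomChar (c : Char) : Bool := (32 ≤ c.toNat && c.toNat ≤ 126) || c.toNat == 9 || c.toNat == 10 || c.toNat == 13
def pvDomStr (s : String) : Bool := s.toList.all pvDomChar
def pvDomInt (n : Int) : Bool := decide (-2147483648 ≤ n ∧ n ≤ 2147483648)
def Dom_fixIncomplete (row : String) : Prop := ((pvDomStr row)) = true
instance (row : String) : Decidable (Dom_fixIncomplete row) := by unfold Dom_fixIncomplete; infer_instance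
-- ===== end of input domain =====

-- B replaces A's stack pipeline by string rewriting (delete adjacent opener/non-opener pairs
-- to a normal form, then translate the reversed normal form): an alternative algorithm.

-- ===== PORT A =====
def keyKeeper : List Char := ['(', '[', '{', '<']
def lockKeeper : List String := [")", "]", "}", ">"]

-- lock_keeper[key_keeper.index(char)]; the getD "" default is unreachable (every stacked char is an opener)
def lockOf (c : Char) : String :=
  ((PySem.List.index? keyKeeper c).bind (fun i => PySem.List.pyGet? lockKeeper i)).getD ""

def fixIncomplete (row : String) : List String :=
  ((row.toList.foldl
    (fun s c => if keyKeeper.contains c then s ++ [c] else s.dropLast) []).foldl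
    (fun r c => r ++ [lockOf c]) []).reverse

-- ===== PORT B =====
def closersMap : PySem.Dict Char String :=
  PySem.Dict.ofList [('(', ")"), ('[', "]"), ('{', "}"), ('<', ">")]

-- 'char in CLOSERS'
def isOpener (c : Char) : Bool := (PySem.Dict.get? closersMap c).isSome

-- the inner for-loop: index of the first adjacent opener/non-opener pair, if any
def findPair : List Char → Option Nat
  | c1 :: c2 :: rest =>
      if isOpener c1 && !isOpener c2 then some 0
      else (findPair (c2 :: rest)).map (· + 1)
  | _ => none

theorem findPair_le (l : List Char) (i : Nat) (h : findPair l = some i) :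
    i + 2 ≤ l.length := by
  induction l generalizing i with
  | nil => simp [findPair] at h
  | cons c1 t ih =>
    match t with
    | [] => simp [findPair] at h
    | c2 :: rest =>
      rw [findPair] at h
      split at h
      · simp only [Option.some.injEq] at h
        simp only [List.length_cons]
        omega
      · simp only [Option.map_eq_some_iff] at h
        obtain ⟨j, hj, rfl⟩ := h
        have := ih j hj
        simp only [List.length_cons] at this ⊢
        omega

-- the outer while-loop: rewrite to normal form
def reduceChars (l : List Char) : List Char :=
  match h : findPair l with
  | some i => reduceChars (l.take i ++ l.drop (i + 2))
  | none => l
termination_by l.length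
decreasing_by
  have := findPair_le l i h
  simp [List.length_take, List.length_drop]
  omega

-- [CLOSERS[c] for c in reversed(chars)]; the getD "" default is the KeyError case, outside Pre_
def fixIncomplete_alt (row : String) : List String :=
  (reduceChars row.toList).reverse.map (fun c => (PySem.Dict.get? closersMap c).getD "")

-- ===== PRECONDITION & SPEC =====
-- Pre_ excludes exactly the rows on which Python A raises IndexError (pop from an empty list)
-- and Python B raises KeyError: every prefix must have at least as many openers as non-openers.
def Pre_fixIncomplete (row : String) : Prop :=
  ∀ n < row.toList.length + 1,
    (row.toList.take n).countP (fun c => !keyKeeper.contains c) ≤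
    (row.toList.take n).countP (fun c => keyKeeper.contains c)
instance (row : String) : Decidable (Pre_fixIncomplete row) := by
  unfold Pre_fixIncomplete; infer_instance

def pvWitness_fixIncomplete : String := "<([)"

def Spec_fixIncomplete (row : String) (out : List String) : Prop := out = fixIncomplete_alt row
instance (row : String) (out : List String) : Decidable (Spec_fixIncomplete row out) := by
  unfold Spec_fixIncomplete; infer_instance

-- ===== CLAIM (what is proved, stated in full; the proofs are below) =====
def Claim_equal_fixIncomplete : Prop :=
  ∀ (row : String), Dom_fixIncomplete row → Pre_fixIncomplete row →
    Spec_fixIncomplete row (fixIncomplete row)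

-- ===== LEMMAS AND PROOFS =====

-- membership in CLOSERS agrees with membership in key_keeper
theorem isOpener_eq_contains (c : Char) : isOpener c = keyKeeper.contains c := by
  by_cases h : keyKeeper.contains c = true
  · simp only [keyKeeper, List.contains_cons, List.contains_nil, Bool.or_eq_true, beq_iff_eq,
      Bool.or_false] at h
    rcases h with h | h | h | h <;> subst h <;> decide
  · have e : closersMap = PySem.Dict.mk [('(', ")"), ('[', "]"), ('{', "}"), ('<', ">")] := by
      decide
    simp only [keyKeeper, List.contains_cons, List.contains_nil, Bool.or_eq_true, beq_iff_eq,
      Bool.or_false, not_or] at h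
    obtain ⟨h1, h2, h3, h4⟩ := h
    simp only [isOpener, e, PySem.Dict.get?]
    simp [keyKeeper, Ne.symm h1, Ne.symm h2, Ne.symm h3, Ne.symm h4, List.contains_eq_mem, h1, h2, h3, h4]

-- for an opener, CLOSERS[c] is exactly lock_keeper[key_keeper.index(c)]
theorem get_closersMap_opener (c : Char) (h : keyKeeper.contains c = true) :
    (PySem.Dict.get? closersMap c).getD "" = lockOf c := by
  simp only [keyKeeper, List.contains_cons, List.contains_nil, Bool.or_eq_true, beq_iff_eq,
    Bool.or_false] at h
  rcases h with h | h | h | h <;> subst h <;> decide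

-- a found pair decomposes the list
theorem findPair_decomp (l : List Char) (i : Nat) (h : findPair l = some i) :
    ∃ u o c v, l = u ++ o :: c :: v ∧ u.length = i ∧
      isOpener o = true ∧ isOpener c = false := by
  induction l generalizing i with
  | nil => simp [findPair] at h
  | cons c1 t ih =>
    match t with
    | [] => simp [findPair] at h
    | c2 :: rest =>
      rw [findPair] at h
      split at h
      · rename_i hb
        simp only [Bool.and_eq_true, Bool.not_eq_true'] at hb
        simp only [Option.some.injEq] at h
        exact ⟨[], c1, c2, rest, by simp, by simp [← h], hb.1, hb.2⟩
      · simp only [Option.map_eq_some_iff] at h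
        obtain ⟨j, hj, rfl⟩ := h
        obtain ⟨u, o, c, v, he, hu, ho, hc⟩ := ih j hj
        exact ⟨c1 :: u, o, c, v, by simp [he], by simp [hu], ho, hc⟩

-- A's stack fold is invariant under deleting one opener/non-opener pair
theorem foldA_delete (u v : List Char) (o c : Char) (s : List Char)
    (ho : keyKeeper.contains o = true) (hc : keyKeeper.contains c = false) :
    (u ++ o :: c :: v).foldl
      (fun s c => if keyKeeper.contains c then s ++ [c] else s.dropLast) s
    = (u ++ v).foldl
      (fun s c => if keyKeeper.contains c then s ++ [c] else s.dropLast) s := by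
  rw [List.foldl_append, List.foldl_append, List.foldl_cons, List.foldl_cons]
  have ho' : o ∈ keyKeeper := by simpa using ho
  have hc' : c ∉ keyKeeper := by simpa using hc
  simp [ho', hc']

-- no pair in a::t means no pair in t
theorem findPair_cons_none (a : Char) (t : List Char) (hat : findPair (a :: t) = none) :
    findPair t = none := by
  match t with
  | [] => rfl
  | c2 :: rest =>
    rw [findPair] at hat
    split at hat
    · simp at hat
    · simpa using hat

-- prefix-balance condition, preserved by deleting one opener/non-opener pair
def Bal (l : List Char) : Prop :=
  ∀ n < l.length + 1,
    (l.take n).countP (fun c => !keyKeeper.contains c) ≤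
    (l.take n).countP (fun c => keyKeeper.contains c)

theorem Bal_delete (u v : List Char) (o c : Char)
    (ho : keyKeeper.contains o = true) (hc : keyKeeper.contains c = false)
    (h : Bal (u ++ o :: c :: v)) : Bal (u ++ v) := by
  intro n hn
  simp only [List.length_append] at hn
  rcases le_or_gt n u.length with hle | hgt
  · have e1 : (u ++ v).take n = u.take n := by
      rw [List.take_append, Nat.sub_eq_zero_of_le hle, List.take_zero, List.append_nil]
    have e2 : (u ++ o :: c :: v).take n = u.take n := by
      rw [List.take_append, Nat.sub_eq_zero_of_le hle, List.take_zero, List.append_nil]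
    have := h n (by simp; omega)
    rw [e2] at this
    rw [e1]
    exact this
  · have e1 : (u ++ v).take n = u ++ v.take (n - u.length) := by
      rw [List.take_append, List.take_of_length_le (by omega)]
    have e2 : (u ++ o :: c :: v).take (n + 2) = u ++ o :: c :: v.take (n - u.length) := by
      rw [List.take_append, List.take_of_length_le (by omega)]
      have : n + 2 - u.length = (n - u.length) + 2 := by omega
      rw [this]
      simp [List.take_succ_cons]
    have := h (n + 2) (by simp; omega)
    rw [e2] at this
    rw [e1]
    simp only [List.countP_append, List.countP_cons, ho, hc] at this ⊢
    simp at this ⊢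
    omega

-- along the rewriting: the stack fold is unchanged, Bal is preserved, and the result is normal
theorem reduceChars_foldA (l : List Char) (s : List Char) :
    (reduceChars l).foldl
      (fun s c => if keyKeeper.contains c then s ++ [c] else s.dropLast) s
    = l.foldl (fun s c => if keyKeeper.contains c then s ++ [c] else s.dropLast) s := by
  fun_induction reduceChars l with
  | case1 l i h ih =>
    rw [ih]
    obtain ⟨u, o, c, v, rfl, hu, ho, hc⟩ := findPair_decomp l i h
    have ht : (u ++ o :: c :: v).take i = u := by
      rw [List.take_append, Nat.sub_eq_zero_of_le (le_of_eq hu.symm),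
        List.take_zero, List.append_nil, ← hu, List.take_length]
    have hd : (u ++ o :: c :: v).drop (i + 2) = v := by
      have h2 : i + 2 - u.length = 2 := by omega
      rw [List.drop_append, h2, List.drop_eq_nil_of_le (by omega)]
      rfl
    rw [ht, hd]
    exact (foldA_delete u v o c s (by rw [← isOpener_eq_contains]; exact ho)
      (by rw [← isOpener_eq_contains]; exact hc)).symm
  | case2 => rfl

theorem reduceChars_bal (l : List Char) (h : Bal l) : Bal (reduceChars l) := by
  fun_induction reduceChars l with
  | case1 l i hp ih =>
    apply ih
    obtain ⟨u, o, c, v, rfl, hu, ho, hc⟩ := findPair_decomp l i hp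
    have ht : (u ++ o :: c :: v).take i = u := by
      rw [List.take_append, Nat.sub_eq_zero_of_le (le_of_eq hu.symm),
        List.take_zero, List.append_nil, ← hu, List.take_length]
    have hd : (u ++ o :: c :: v).drop (i + 2) = v := by
      have h2 : i + 2 - u.length = 2 := by omega
      rw [List.drop_append, h2, List.drop_eq_nil_of_le (by omega)]
      rfl
    rw [ht, hd]
    exact Bal_delete u v o c (by rw [← isOpener_eq_contains]; exact ho)
      (by rw [← isOpener_eq_contains]; exact hc) h
  | case2 => exact h

theorem reduceChars_normal (l : List Char) :
    findPair (reduceChars l) = none := by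
  fun_induction reduceChars l with
  | case1 l i h ih => exact ih
  | case2 l h => exact h

-- in a normal form, everything after an opener is an opener
theorem normal_head_all (l : List Char) (hn : findPair l = none) :
    ∀ c1 t, l = c1 :: t → keyKeeper.contains c1 = true →
      ∀ c ∈ l, keyKeeper.contains c = true := by
  induction l with
  | nil => intro c1 t he; simp at he
  | cons a s ih =>
    intro c1 t he h1 c hc
    obtain ⟨rfl, rfl⟩ : a = c1 ∧ s = t := by
      injection he with h1 h2; exact ⟨h1, h2⟩
    rcases List.mem_cons.mp hc with rfl | hc
    · exact h1
    match s, hc with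
    | c2 :: rest, hc =>
      have h2 : keyKeeper.contains c2 = true := by
        by_contra hc2
        simp only [Bool.not_eq_true] at hc2
        rw [findPair,
          if_pos (by rw [isOpener_eq_contains, isOpener_eq_contains, h1, hc2]; rfl)] at hn
        simp at hn
      exact ih (findPair_cons_none _ _ hn) c2 rest rfl h2 c hc

-- a normal form satisfying Bal consists of openers only
theorem normal_bal_all_openers (l : List Char) (hn : findPair l = none) (hb : Bal l) :
    ∀ c ∈ l, keyKeeper.contains c = true := by
  match l with
  | [] => simp
  | c1 :: t =>
    have h1 : keyKeeper.contains c1 = true := by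
      by_contra hc
      have := hb 1 (by simp)
      simp only [List.take_succ_cons, List.take_zero] at this
      have hc' : c1 ∉ keyKeeper := by simpa using hc
      simp [hc'] at this
    exact normal_head_all _ hn c1 t rfl h1

-- the stack fold over a list of openers just appends it
theorem foldA_all_openers (l : List Char) (s : List Char)
    (h : ∀ c ∈ l, keyKeeper.contains c = true) :
    l.foldl (fun s c => if keyKeeper.contains c then s ++ [c] else s.dropLast) s
      = s ++ l := by
  induction l generalizing s with
  | nil => simp
  | cons c t ih =>
    rw [List.foldl_cons, if_pos (h c (by simp))]
    rw [ih _ (fun c hc => h c (by simp [hc]))]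
    simp

-- A's second loop is a map
theorem foldl_append_map (l : List Char) (acc : List String) :
    l.foldl (fun r c => r ++ [lockOf c]) acc = acc ++ l.map lockOf := by
  induction l generalizing acc with
  | nil => simp
  | cons c t ih => simp [List.foldl_cons, ih]

-- ===== VERDICT (by name: the statement is the Claim_ definition above) =====
theorem fixIncomplete_spec : Claim_equal_fixIncomplete := by
  intro row _ hpre
  unfold Spec_fixIncomplete fixIncomplete fixIncomplete_alt
  have hb : Bal row.toList := hpre
  have hall := normal_bal_all_openers (reduceChars row.toList)
    (reduceChars_normal row.toList) (reduceChars_bal row.toList hb)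
  have hfold := reduceChars_foldA row.toList []
  rw [← hfold, foldA_all_openers _ _ hall, List.nil_append, foldl_append_map,
    List.nil_append, ← List.map_reverse]
  apply List.map_congr_left
  intro c hc
  exact (get_closersMap_opener c (hall c (by simpa using hc))).symm
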